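-- pv_equiv track=rewrite | github.com/AIAmplitudes/AIAmplitudes_common_public | src/aiamplitudes_common_public/uncompressor.py | get24
-- ===== SOURCE A (Python) =====
-- quad_bases = ["dddd", "bbbd", "bdbd", "bbdd", "dbdd", "fbdd", "dbbd", "cddd"]
--
-- quad_cyclic = [
--     "eeee", "ffff", "ccce", "aaaf", "cece", "afaf", "ccee", "aaff",
--     "ecee", "faff", "dcee", "eaff", "ecce", "faaf", "aeee", "bfff",
-- ]
--
-- def Subst(key, transf):
--     """Apply a 6-letter permutation (string transf) to key."""
--     res = ""
--     for l in key:
--         res += transf[ord(l) - ord('a')]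
--     return res
--
-- def get24(key):
--     """Given a key (prefix + 4-letter ending), return the 24 quad-basis keys
--     and their dihedral-equivalent originals.
--
--     Returns (linquads, orig) where linquads[i] has the basis ending suitable
--     for lookup in the quad file, and orig[i] is the actual symbol key.
--     """
--     res = []
--     res2 = []
--     rotations = ["cabfde", "bcaefd"]
--     for i in range(len(quad_bases)):
--         res.append(key[:-4] + quad_bases[i])
--         res2.append(key[:-4] + quad_bases[i])
--         res.append(Subst(key[:-4] + quad_cyclic[2 * i], rotations[0]))
--         res2.append(key[:-4] + quad_cyclic[2 * i])
--         res.append(Subst(key[:-4] + quad_cyclic[2 * i + 1], rotations[1]))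
--         res2.append(key[:-4] + quad_cyclic[2 * i + 1])
--     return res, res2
-- ===== SOURCE B (Python) =====
-- quad_bases = ["dddd", "bbbd", "bdbd", "bbdd", "dbdd", "fbdd", "dbbd", "cddd"]
--
-- quad_cyclic = [
--     "eeee", "ffff", "ccce", "aaaf", "cece", "afaf", "ccee", "aaff",
--     "ecee", "faff", "dcee", "eaff", "ecce", "faaf", "aeee", "bfff",
-- ]
--
-- _ROTS = ("cabfde", "bcaefd")
--
-- def _subst(s, t):
--     # per-character translation; Python indexing semantics (negative wraps, IndexError out of range)
--     return "".join(t[ord(c) - 97] for c in s)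
--
-- # Subst distributes over concatenation, so transform the 16 cyclic endings once, at import time.
-- _TABLE = [(quad_bases[i],
--            _subst(quad_cyclic[2 * i], _ROTS[0]),
--            _subst(quad_cyclic[2 * i + 1], _ROTS[1])) for i in range(8)]
--
-- def get24(key):
--     pre = key[:-4]
--     p0 = _subst(pre, _ROTS[0])
--     p1 = _subst(pre, _ROTS[1])
--     res = [x for b, e0, e1 in _TABLE for x in (pre + b, p0 + e0, p1 + e1)]
--     res2 = [pre + e
--             for i in range(8)
--             for e in (quad_bases[i], quad_cyclic[2 * i], quad_cyclic[2 * i + 1])]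
--     return res, res2
-- ===== Notes on version B (the rewrite author's own statement) =====
-- stated objective: alternative
-- what changed: B exploits that Subst is per-character and distributes over concatenation: the 16 rotated 4-letter endings are precomputed once as a constant table, the prefix is translated just twice (once per rotation), and the 24 entries of each output list are produced by one flat comprehension instead of re-substituting the whole prefix+ending string 16 times inside the loop.
import Mathlib
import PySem

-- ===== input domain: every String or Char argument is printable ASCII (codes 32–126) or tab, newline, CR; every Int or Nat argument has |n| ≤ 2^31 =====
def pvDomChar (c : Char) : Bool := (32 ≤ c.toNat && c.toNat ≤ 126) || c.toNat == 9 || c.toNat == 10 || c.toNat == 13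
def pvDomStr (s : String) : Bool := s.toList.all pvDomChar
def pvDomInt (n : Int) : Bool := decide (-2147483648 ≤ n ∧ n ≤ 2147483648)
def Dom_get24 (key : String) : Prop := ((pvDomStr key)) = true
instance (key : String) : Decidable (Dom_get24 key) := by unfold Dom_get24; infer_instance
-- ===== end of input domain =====

-- B precomputes the 16 rotated endings as a constant table and translates the prefix once per
-- rotation instead of re-substituting the whole prefix+ending string 16 times (alternative decomposition).

-- ===== PORT A =====
def quadBasesA : List (List Char) :=
  ["dddd".toList, "bbbd".toList, "bdbd".toList, "bbdd".toList,
   "dbdd".toList, "fbdd".toList, "dbbd".toList, "cddd".toList]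

def quadCyclicA : List (List Char) :=
  ["eeee".toList, "ffff".toList, "ccce".toList, "aaaf".toList,
   "cece".toList, "afaf".toList, "ccee".toList, "aaff".toList,
   "ecee".toList, "faff".toList, "dcee".toList, "eaff".toList,
   "ecce".toList, "faaf".toList, "aeee".toList, "bfff".toList]

-- Subst of A: res = ""; for l in key: res += transf[ord(l)-97]  (none = IndexError)
def substA (cs transf : List Char) : Option (List Char) :=
  cs.foldl (fun acc l =>
      acc.bind fun r =>
        (PySem.List.pyGet? transf ((l.toNat : Int) - 97)).map (fun ch => r ++ [ch]))
    (some [])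

def get24 (key : String) : List String × List String :=
  let pre := PySem.List.slice key.toList none (some (-4))
  let rot0 := "cabfde".toList
  let rot1 := "bcaefd".toList
  ((PySem.List.pyRange 0 8 1).foldl (fun acc i =>
      acc.bind fun st =>
        let b := quadBasesA.getD i.toNat []
        let c0 := quadCyclicA.getD (2 * i).toNat []
        let c1 := quadCyclicA.getD (2 * i + 1).toNat []
        (substA (pre ++ c0) rot0).bind fun s0 =>
        (substA (pre ++ c1) rot1).map fun s1 =>
          (st.1 ++ [String.ofList (pre ++ b), String.ofList s0, String.ofList s1],
           st.2 ++ [String.ofList (pre ++ b), String.ofList (pre ++ c0), String.ofList (pre ++ c1)]))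
    (some ([], []))).getD ([], [])   -- getD unreachable under Pre_get24 (Subst never raises there)

-- ===== PORT B =====
-- _subst of B: "".join(t[ord(c)-97] for c in s)
def substB (cs transf : List Char) : Option (List Char) :=
  cs.mapM (fun c => PySem.List.pyGet? transf ((c.toNat : Int) - 97))

-- _TABLE of B: (base, rotated even cyclic ending, rotated odd cyclic ending) per i
def endTableB : List (List Char × List Char × List Char) :=
  (List.range 8).map (fun i =>
    (quadBasesA.getD i [],
     (substB (quadCyclicA.getD (2 * i) []) "cabfde".toList).getD [],
     (substB (quadCyclicA.getD (2 * i + 1) []) "bcaefd".toList).getD []))  -- getD unreachable: constant endings are in a..f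

def get24_alt (key : String) : List String × List String :=
  let pre := PySem.List.slice key.toList none (some (-4))
  match substB pre "cabfde".toList, substB pre "bcaefd".toList with
  | some p0, some p1 =>
      (endTableB.flatMap (fun t =>
         [String.ofList (pre ++ t.1), String.ofList (p0 ++ t.2.1), String.ofList (p1 ++ t.2.2)]),
       (List.range 8).flatMap (fun i =>
         [String.ofList (pre ++ quadBasesA.getD i []),
          String.ofList (pre ++ quadCyclicA.getD (2 * i) []),
          String.ofList (pre ++ quadCyclicA.getD (2 * i + 1) [])]))
  | _, _ => ([], [])   -- unreachable under Pre_get24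

-- ===== PRECONDITION & SPEC =====
-- Pre_ excludes exactly the keys whose prefix key[:-4] has a character outside codes 91..102,
-- where transf[ord(l)-97] is an IndexError and both programs raise.
def Pre_get24 (key : String) : Prop :=
  (key.toList.take (key.toList.length - 4)).all (fun c => 91 ≤ c.toNat && c.toNat ≤ 102) = true
instance (key : String) : Decidable (Pre_get24 key) := by unfold Pre_get24; infer_instance

def pvWitness_get24 : String := "abceeee"

def Spec_get24 (key : String) (out : List String × List String) : Prop := out = get24_alt key
instance (key : String) (out : List String × List String) : Decidable (Spec_get24 key out) := by unfold Spec_get24; infer_instance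

-- ===== CLAIM (what is proved, stated in full; the proofs are below) =====
def Claim_equal_get24 : Prop := ∀ (key : String), Dom_get24 key → Pre_get24 key → Spec_get24 key (get24 key)

-- ===== LEMMAS AND PROOFS =====

theorem substA_foldl_none (transf : List Char) (cs : List Char) :
    cs.foldl (fun acc l =>
        acc.bind fun r =>
          (PySem.List.pyGet? transf ((l.toNat : Int) - 97)).map (fun ch => r ++ [ch]))
      none = none := by
  induction cs with
  | nil => rfl
  | cons c cs ih => simpa using ih

theorem substA_foldl_some (transf : List Char) (cs : List Char) (r : List Char) :
    cs.foldl (fun acc l =>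
        acc.bind fun rr =>
          (PySem.List.pyGet? transf ((l.toNat : Int) - 97)).map (fun ch => rr ++ [ch]))
      (some r) = (substB cs transf).map (r ++ ·) := by
  induction cs generalizing r with
  | nil => simp [substB]
  | cons c cs ih =>
    simp only [List.foldl_cons, Option.bind_some, substB, List.mapM_cons]
    cases h : PySem.List.pyGet? transf ((c.toNat : Int) - 97) with
    | none => simp [substA_foldl_none]
    | some ch =>
      simp only [Option.map_some, ih, substB]
      cases cs.mapM (fun c => PySem.List.pyGet? transf ((c.toNat : Int) - 97)) <;> simp

theorem substA_eq_substB (cs transf : List Char) : substA cs transf = substB cs transf := by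
  simpa [substA] using substA_foldl_some transf cs []

theorem substB_append (cs ds transf : List Char) :
    substB (cs ++ ds) transf =
      (substB cs transf).bind fun r => (substB ds transf).map (r ++ ·) := by
  simp only [substB, List.mapM_append]
  cases cs.mapM (fun c => PySem.List.pyGet? transf ((c.toNat : Int) - 97)) <;>
    cases ds.mapM (fun c => PySem.List.pyGet? transf ((c.toNat : Int) - 97)) <;> simp

theorem pyGet?_isSome_rot (transf : List Char) (hlen : transf.length = 6) (c : Char)
    (hc : 91 ≤ c.toNat ∧ c.toNat ≤ 102) :
    (PySem.List.pyGet? transf ((c.toNat : Int) - 97)).isSome := by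
  simp only [PySem.List.pyGet?, PySem.List.pyIdx?, hlen]
  split_ifs with h4 h5 h6 <;> simp_all <;> omega

theorem substB_isSome (cs transf : List Char) (hlen : transf.length = 6)
    (h : ∀ c ∈ cs, 91 ≤ c.toNat ∧ c.toNat ≤ 102) : (substB cs transf).isSome := by
  induction cs with
  | nil => simp [substB]
  | cons c cs ih =>
    obtain ⟨ch, hch⟩ := Option.isSome_iff_exists.mp
      (pyGet?_isSome_rot transf hlen c (h c (by simp)))
    obtain ⟨rs, hrs⟩ := Option.isSome_iff_exists.mp (ih (fun x hx => h x (by simp [hx])))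
    have hrs' : cs.mapM (fun c => PySem.List.pyGet? transf ((c.toNat : Int) - 97)) = some rs := hrs
    simp [substB, List.mapM_cons, hch, hrs']

theorem main_bodies (pre p0 p1 : List Char)
    (h0 : substB pre "cabfde".toList = some p0)
    (h1 : substB pre "bcaefd".toList = some p1) :
    ((PySem.List.pyRange 0 8 1).foldl (fun acc i =>
      acc.bind fun st =>
        let b := quadBasesA.getD i.toNat []
        let c0 := quadCyclicA.getD (2 * i).toNat []
        let c1 := quadCyclicA.getD (2 * i + 1).toNat []
        (substA (pre ++ c0) "cabfde".toList).bind fun s0 =>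
        (substA (pre ++ c1) "bcaefd".toList).map fun s1 =>
          (st.1 ++ [String.ofList (pre ++ b), String.ofList s0, String.ofList s1],
           st.2 ++ [String.ofList (pre ++ b), String.ofList (pre ++ c0), String.ofList (pre ++ c1)]))
      (some ([], []))).getD ([], []) =
    (endTableB.flatMap (fun t =>
       [String.ofList (pre ++ t.1), String.ofList (p0 ++ t.2.1), String.ofList (p1 ++ t.2.2)]),
     (List.range 8).flatMap (fun i =>
       [String.ofList (pre ++ quadBasesA.getD i []),
        String.ofList (pre ++ quadCyclicA.getD (2 * i) []),
        String.ofList (pre ++ quadCyclicA.getD (2 * i + 1) [])])) := by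
  have hr : PySem.List.pyRange 0 8 1 = [0,1,2,3,4,5,6,7] := by decide
  have hsplit0 : ∀ e, substA (pre ++ e) "cabfde".toList = (substB e "cabfde".toList).map (p0 ++ ·) := by
    intro e; rw [substA_eq_substB, substB_append, h0]; rfl
  have hsplit1 : ∀ e, substA (pre ++ e) "bcaefd".toList = (substB e "bcaefd".toList).map (p1 ++ ·) := by
    intro e; rw [substA_eq_substB, substB_append, h1]; rfl
  have hT : endTableB = [("dddd".toList, "dddd".toList, "dddd".toList),
      ("bbbd".toList, "bbbd".toList, "bbbd".toList),
      ("bdbd".toList, "bdbd".toList, "bdbd".toList),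
      ("bbdd".toList, "bbdd".toList, "bbdd".toList),
      ("dbdd".toList, "dbdd".toList, "dbdd".toList),
      ("fbdd".toList, "fbdd".toList, "fbdd".toList),
      ("dbbd".toList, "dbbd".toList, "dbbd".toList),
      ("cddd".toList, "cddd".toList, "cddd".toList)] := by decide
  simp only [hr, List.foldl_cons, List.foldl_nil]
  norm_num [quadBasesA, quadCyclicA, show Int.toNat 0 = 0 from by decide,
      show Int.toNat 1 = 1 from by decide,
      show Int.toNat 2 = 2 from by decide,
      show Int.toNat 3 = 3 from by decide,
      show Int.toNat 4 = 4 from by decide,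
      show Int.toNat 5 = 5 from by decide,
      show Int.toNat 6 = 6 from by decide,
      show Int.toNat 7 = 7 from by decide,
      show Int.toNat 8 = 8 from by decide,
      show Int.toNat 9 = 9 from by decide,
      show Int.toNat 10 = 10 from by decide,
      show Int.toNat 11 = 11 from by decide,
      show Int.toNat 12 = 12 from by decide,
      show Int.toNat 13 = 13 from by decide,
      show Int.toNat 14 = 14 from by decide,
      show Int.toNat 15 = 15 from by decide, hsplit0, hsplit1, hT, List.flatMap,
      show substB "eeee".toList "cabfde".toList = some "dddd".toList from by decide,
      show substB "ffff".toList "bcaefd".toList = some "dddd".toList from by decide,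
      show substB "ccce".toList "cabfde".toList = some "bbbd".toList from by decide,
      show substB "aaaf".toList "bcaefd".toList = some "bbbd".toList from by decide,
      show substB "cece".toList "cabfde".toList = some "bdbd".toList from by decide,
      show substB "afaf".toList "bcaefd".toList = some "bdbd".toList from by decide,
      show substB "ccee".toList "cabfde".toList = some "bbdd".toList from by decide,
      show substB "aaff".toList "bcaefd".toList = some "bbdd".toList from by decide,
      show substB "ecee".toList "cabfde".toList = some "dbdd".toList from by decide,
      show substB "faff".toList "bcaefd".toList = some "dbdd".toList from by decide,
      show substB "dcee".toList "cabfde".toList = some "fbdd".toList from by decide,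
      show substB "eaff".toList "bcaefd".toList = some "fbdd".toList from by decide,
      show substB "ecce".toList "cabfde".toList = some "dbbd".toList from by decide,
      show substB "faaf".toList "bcaefd".toList = some "dbbd".toList from by decide,
      show substB "aeee".toList "cabfde".toList = some "cddd".toList from by decide,
      show substB "bfff".toList "bcaefd".toList = some "cddd".toList from by decide]
  norm_num [show List.range 8 = [0,1,2,3,4,5,6,7] from by decide]

-- ===== VERDICT (by name: the statement is the Claim_ definition above) =====
theorem get24_spec : Claim_equal_get24 := by
  intro key hdom hpre
  show get24 key = get24_alt key
  have hslice : PySem.List.slice key.toList none (some (-4)) =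
      key.toList.take (key.toList.length - 4) := by
    simp only [Int.reduceNeg, Nat.one_lt_ofNat, PySem.List.slice_to_neg_ofNat]
  have hall : ∀ c ∈ key.toList.take (key.toList.length - 4), 91 ≤ c.toNat ∧ c.toNat ≤ 102 := by
    intro c hc
    have := List.all_eq_true.mp hpre c hc
    simpa using this
  obtain ⟨p0, h0⟩ := Option.isSome_iff_exists.mp
    (substB_isSome _ "cabfde".toList (by decide) hall)
  obtain ⟨p1, h1⟩ := Option.isSome_iff_exists.mp
    (substB_isSome _ "bcaefd".toList (by decide) hall)
  unfold get24 get24_alt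
  simp only [hslice]
  rw [main_bodies _ p0 p1 h0 h1, h0, h1]
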